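-- pv_equiv track=rewrite | github.com/Dudnik-Denys/tasks | stepik_pygen_profy/profy_4/profy_4_1/profy_4_1_18.py | is_arithmetic
-- ===== SOURCE A (Python) =====
-- def is_arithmetic(sequence: list) -> str:
--     counter = 0
--     for x in range(len(sequence[:-1])):
--         if sequence[x + 1] - sequence[x] == 1:
--             counter += 1
--         else:
--             break
--     if counter == len(sequence) - 1:
--         return 'Арифметическая прогрессия'
--     return 'Не прогрессия'
-- ===== SOURCE B (Python) =====
-- def is_arithmetic(sequence: list) -> str:
--     if sequence and sequence == [sequence[0] + i for i in range(len(sequence))]: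
--         return 'Арифметическая прогрессия'
--     return 'Не прогрессия'
-- ===== Notes on version B (the rewrite author's own statement) =====
-- stated objective: simpler
-- what changed: B builds the expected arithmetic sequence starting from the first element and compares it to the input wholesale, replacing A's short-circuit pairwise-difference counting loop.
import Mathlib
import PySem

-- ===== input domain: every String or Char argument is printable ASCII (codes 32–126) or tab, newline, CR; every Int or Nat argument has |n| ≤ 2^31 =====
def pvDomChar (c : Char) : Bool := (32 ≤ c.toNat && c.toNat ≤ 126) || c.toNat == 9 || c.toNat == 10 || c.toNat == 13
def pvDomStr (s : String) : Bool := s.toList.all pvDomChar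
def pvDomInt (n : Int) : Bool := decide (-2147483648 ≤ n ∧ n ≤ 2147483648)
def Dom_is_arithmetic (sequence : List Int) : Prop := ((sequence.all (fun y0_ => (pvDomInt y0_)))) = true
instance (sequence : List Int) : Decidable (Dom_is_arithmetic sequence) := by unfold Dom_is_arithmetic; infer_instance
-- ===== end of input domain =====

-- B replaces A's short-circuit pairwise-difference counting loop by building the expected
-- arithmetic sequence from sequence[0] and comparing it to the input (objective: simpler).


-- ===== PORT A =====
-- the 'for x in range(…): … else: break' loop; pyGetD's default 0 is never used
-- (every index x, x+1 visited by the range is in bounds)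
def aLoop (sequence : List Int) : List Int → Int → Int
  | [], counter => counter
  | x :: xs, counter =>
    if PySem.List.pyGetD sequence (x + 1) 0 - PySem.List.pyGetD sequence x 0 = 1 then
      aLoop sequence xs (counter + 1)
    else counter

def is_arithmetic (sequence : List Int) : String :=
  let counter :=
    aLoop sequence
      (PySem.List.pyRange 0 ((PySem.List.slice sequence none (some (-1))).length : Int) 1) 0
  if counter = (sequence.length : Int) - 1 then "Арифметическая прогрессия"
  else "Не прогрессия"

-- ===== PORT B =====
def is_arithmetic_alt (sequence : List Int) : String :=
  match sequence with
  | [] => "Не прогрессия"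
  | h :: _ =>
    if sequence = (PySem.List.pyRange 0 (sequence.length : Int) 1).map (fun i => h + i) then
      "Арифметическая прогрессия"
    else "Не прогрессия"

-- ===== PRECONDITION & SPEC =====
def Spec_is_arithmetic (sequence : List Int) (out : String) : Prop := out = is_arithmetic_alt sequence
instance (sequence : List Int) (out : String) : Decidable (Spec_is_arithmetic sequence out) := by unfold Spec_is_arithmetic; infer_instance

-- ===== CLAIM (what is proved, stated in full; the proofs are below) =====
def Claim_equal_is_arithmetic : Prop := ∀ (sequence : List Int), Dom_is_arithmetic sequence → Spec_is_arithmetic sequence (is_arithmetic sequence)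

-- ===== LEMMAS AND PROOFS =====

-- structural version of A's loop: length of the maximal prefix of consecutive +1 steps
def run : List Int → Int
  | a :: b :: t => if b - a = 1 then 1 + run (b :: t) else 0
  | _ => 0

theorem aLoop_eq_run : ∀ (cur pre : List Int) (c : Int),
    aLoop (pre ++ cur) (PySem.List.pyRange (pre.length : Int)
      ((pre.length : Int) + ((cur.length : Int) - 1)) 1) c = c + run cur := by
  intro cur
  induction cur with
  | nil =>
    intro pre c
    simp only [List.length_nil, Nat.cast_zero]
    rw [PySem.List.pyRange_one_eq_nil (by omega)]
    simp [aLoop, run]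
  | cons a t ih =>
    intro pre c
    match t with
    | [] =>
      have e : (pre.length : Int) + (((a :: ([] : List Int)).length : Int) - 1)
          = (pre.length : Int) := by simp
      rw [e, PySem.List.pyRange_one_eq_nil (le_refl _)]
      simp [aLoop, run]
    | b :: t' =>
      have hlt : (pre.length : Int) < (pre.length : Int) + (((a :: b :: t').length : Int) - 1) := by
        simp only [List.length_cons]; push_cast; omega
      rw [PySem.List.pyRange_one_cons hlt]
      have hA : PySem.List.pyGetD (pre ++ a :: b :: t') (pre.length : Int) 0 = a := by
        rw [PySem.List.pyGetD_natCast]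
        simp [List.getD]
      have hB : PySem.List.pyGetD (pre ++ a :: b :: t') ((pre.length : Int) + 1) 0 = b := by
        have e : ((pre.length : Int) + 1) = ((pre.length + 1 : Nat) : Int) := by push_cast; ring
        rw [e, PySem.List.pyGetD_natCast]
        simp [List.getD, (by omega : pre.length + 1 - pre.length = 1)]
      simp only [aLoop, hA, hB]
      by_cases h : b - a = 1
      · have hre : pre ++ a :: b :: t' = (pre ++ [a]) ++ (b :: t') := by simp
        have hmain := ih (pre ++ [a]) (c + 1)
        rw [hre]
        have hrange : PySem.List.pyRange ((pre.length : Int) + 1)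
            ((pre.length : Int) + (((a :: b :: t').length : Int) - 1)) 1
            = PySem.List.pyRange ((pre ++ [a]).length : Int)
              (((pre ++ [a]).length : Int) + (((b :: t').length : Int) - 1)) 1 := by
          have e1 : ((pre ++ [a]).length : Int) = (pre.length : Int) + 1 := by simp
          rw [e1]; congr 1; simp; omega
        rw [hrange, if_pos h, hmain]
        have e2 : run (a :: b :: t') = 1 + run (b :: t') := by simp [run, h]
        rw [e2]; ring
      · rw [if_neg h]
        simp [run, h]

theorem aLoop_char (s : List Int) (c : Int) :
    aLoop s (PySem.List.pyRange 0 (((s.length : Int) - 1)) 1) c = c + run s := by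
  have h := aLoop_eq_run s [] c
  simpa using h

-- run hits length-1 exactly when the list is h, h+1, h+2, …
theorem run_full_iff : ∀ (t : List Int) (h : Int),
    run (h :: t) = (t.length : Int) ↔
      h :: t = (List.range (t.length + 1)).map (fun k : Nat => h + (k : Int)) := by
  intro t
  induction t with
  | nil => intro h; simp [run, List.range_succ]
  | cons b t' ih =>
    intro h
    have hrange : List.range ((b :: t').length + 1)
        = 0 :: (List.range (t'.length + 1)).map (· + 1) := by
      simp [List.range_succ_eq_map]
    by_cases hd : b = h + 1
    · subst hd
      have e1 : run (h :: (h + 1) :: t') = 1 + run ((h + 1) :: t') := by simp [run]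
      have e2 : (List.range (((h+1) :: t').length + 1)).map (fun k : Nat => h + (k : Int))
          = h :: (List.range (t'.length + 1)).map (fun k : Nat => (h + 1) + (k : Int)) := by
        rw [hrange, List.map_cons, List.map_map]
        refine congrArg₂ _ (by simp) (List.map_congr_left fun k _ => ?_)
        simp only [Function.comp]; push_cast; ring
      rw [e1, e2]
      simp only [List.cons.injEq, true_and]
      rw [← ih (h + 1)]
      constructor
      · intro hr
        have hlen : ((((h+1) :: t').length : Nat) : Int) = (t'.length : Int) + 1 := by simp
        rw [hlen] at hr
        generalize hg : run ((h + 1) :: t') = r at hr ⊢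
        omega
      · intro hr
        rw [hr]; simp only [List.length_cons]; push_cast; ring
    · have e0 : run (h :: b :: t') = 0 := by
        simp only [run]
        rw [if_neg (by omega : ¬ b - h = 1)]
      rw [e0]
      constructor
      · intro hr
        exfalso
        simp only [List.length_cons, Nat.cast_add, Nat.cast_one] at hr
        omega
      · intro he
        exfalso
        have h1 := congrArg (fun l => l[1]?) he
        simp at h1
        omega

theorem is_arithmetic_eq_alt (s : List Int) : is_arithmetic s = is_arithmetic_alt s := by
  match s with
  | [] => rfl
  | h :: t =>
    have hct : ((h :: t).length : Int) - 1 = (t.length : Int) := by simp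
    have hrun : aLoop (h :: t) (PySem.List.pyRange 0 (t.length : Int) 1) 0 = run (h :: t) := by
      have hh := aLoop_char (h :: t) 0
      rw [hct] at hh
      simpa using hh
    have hsl : ((PySem.List.slice (h :: t) none (some (-1))).length : Int)
        = (((h :: t).length : Int)) - 1 := by
      rw [PySem.List.slice_to_neg_one]; simp
    have hbr : (PySem.List.pyRange 0 (((h :: t).length : Int)) 1).map (fun i => h + i)
        = (List.range (t.length + 1)).map (fun k : Nat => h + (k : Int)) := by
      rw [PySem.List.pyRange_one]
      simp [List.map_map]
    simp only [is_arithmetic, is_arithmetic_alt, hsl, hct, hrun, hbr]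
    by_cases hc : run (h :: t) = (t.length : Int)
    · rw [if_pos hc, if_pos ((run_full_iff t h).mp hc)]
    · rw [if_neg hc, if_neg fun he => hc ((run_full_iff t h).mpr he)]

-- ===== VERDICT (by name: the statement is the Claim_ definition above) =====
theorem is_arithmetic_spec : Claim_equal_is_arithmetic := by
  intro sequence _
  unfold Spec_is_arithmetic
  exact is_arithmetic_eq_alt sequence
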